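-- pv_equiv track=rewrite | github.com/fruizt/cryptography-app | back_py/app/controller/classic_controller/affine_controller.py | smartAnalysisAffine
-- ===== SOURCE A (Python) =====
-- inverse={1: 1, 3: 9, 5: 21, 7: 15, 9: 3, 11: 19, 15: 7, 17: 23, 19: 11, 21: 5, 23: 17, 25: 25}
--
-- frecuentLetters=[[4,19],[4,0],[4,14],[4,8],[4,18],[4,7],[4,17]]
--
-- def decryptAffin(text,a,b):
--     text=''.join(e for e in text if e.isalnum())
--     text=text.lower()
--     textCiph=[ord(letter)-97 for letter in text]
--
--     encrypt=[chr((inverse[a]*(letter-b))%26+97) for letter in textCiph ]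
--     return "".join(encrypt)
--
-- def smartAnalysisAffine(text):
--     text=''.join(e for e in text if e.isalnum())
--     text=text.lower()
--     letters=[[i] for i in range(26)]
--     results=[]
--     for i in letters:
--         i.append(text.count(chr(i[0]+97)))
--     letters.sort(key=lambda x: x[1],reverse=True)
--     listValid=list(inverse.keys())
--     for option in frecuentLetters:
--         x1=option[0]
--         x2=option[1]
--         y1=letters[0][0]
--         y2=letters[1][0]
--
--         for lt in inverse:
--             for i in range(26):
--                 if (x1*lt+i)%26==y1 and (x2*lt+i)%26==y2:
--                     results.append(f"key a:{lt},b:{i} \n {decryptAffin(text,lt,i)}\n ")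
--
--
--     return "\n".join(results)
-- ===== SOURCE B (Python) =====
-- inverse={1: 1, 3: 9, 5: 21, 7: 15, 9: 3, 11: 19, 15: 7, 17: 23, 19: 11, 21: 5, 23: 17, 25: 25}
--
-- frecuentLetters=[[4,19],[4,0],[4,14],[4,8],[4,18],[4,7],[4,17]]
--
-- def decryptAffin(text,a,b):
--     text=''.join(e for e in text if e.isalnum())
--     text=text.lower()
--     textCiph=[ord(letter)-97 for letter in text]
--
--     encrypt=[chr((inverse[a]*(letter-b))%26+97) for letter in textCiph ]
--     return "".join(encrypt)
--
-- def smartAnalysisAffine(text):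
--     text=''.join(e for e in text if e.isalnum()).lower()
--     cnt=[text.count(chr(i+97)) for i in range(26)]
--     # top two letters by frequency, lowest letter index on ties (no sort)
--     y1=max(range(26), key=lambda i: cnt[i])
--     y2=max((i for i in range(26) if i != y1), key=lambda i: cnt[i])
--     results=[]
--     for x1,x2 in frecuentLetters:
--         for a in inverse:
--             # solve x1*a + b == y1 (mod 26) directly instead of trying all 26 b's
--             b=(y1-x1*a)%26
--             if (x2*a+b)%26==y2:
--                 results.append(f"key a:{a},b:{b} \n {decryptAffin(text,a,b)}\n ")
--     return "\n".join(results)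
-- ===== Notes on version B (the rewrite author's own statement) =====
-- stated objective: simpler
-- what changed: B replaces A's build-and-stable-sort of all 26 [letter,count] pairs by two linear argmax passes for the top-two letters, and replaces A's brute-force inner scan of all 26 values of b by solving the congruence b=(y1-x1*a)%26 directly and checking the second equation once.
import Mathlib
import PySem

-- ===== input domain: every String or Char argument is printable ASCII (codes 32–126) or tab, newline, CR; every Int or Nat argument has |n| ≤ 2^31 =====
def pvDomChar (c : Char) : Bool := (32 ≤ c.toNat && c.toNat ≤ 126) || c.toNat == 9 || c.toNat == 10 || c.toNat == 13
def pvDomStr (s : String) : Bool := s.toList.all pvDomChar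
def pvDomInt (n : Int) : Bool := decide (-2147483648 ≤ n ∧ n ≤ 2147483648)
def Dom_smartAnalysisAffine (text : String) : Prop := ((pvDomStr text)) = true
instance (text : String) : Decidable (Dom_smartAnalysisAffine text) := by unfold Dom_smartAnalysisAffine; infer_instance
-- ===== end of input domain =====

-- B replaces A's stable sort of the 26 [letter,count] pairs by two argmax passes and solves
-- the congruence for b directly instead of scanning all 26 candidates; same output, simpler.


-- shared module-level constants (same in A's module and in Source B)
def pvInverse : PySem.Dict Int Int :=
  PySem.Dict.ofList [(1,1),(3,9),(5,21),(7,15),(9,3),(11,19),(15,7),(17,23),(19,11),(21,5),(23,17),(25,25)]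

def pvFrecuentLetters : List (Int × Int) :=
  [(4,19),(4,0),(4,14),(4,8),(4,18),(4,7),(4,17)]

-- shared helper decryptAffin (identical function in A's module and in Source B); text already a char list
def decryptAffin (text : List Char) (a b : Int) : String :=
  let t := PySem.Chars.lower (text.filter PySem.Chars.isalnum)
  let textCiph := t.map (fun letter => ((letter.toNat : Int) - 97))
  let encrypt := textCiph.map (fun letter =>
    Char.ofNat ((PySem.Int.mod (PySem.Dict.getD pvInverse a 0 * (letter - b)) 26).toNat + 97))
  String.ofList encrypt

-- text.count(chr(i+97)) (the same counting expression occurs in A and in B)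
def pvCount (t : List Char) (i : Int) : Int :=
  (PySem.Chars.count t [Char.ofNat (i + 97).toNat] : Int)

-- the result f-string (identical in A and in Source B)
def pvEntry (t : List Char) (a b : Int) : String :=
  "key a:" ++ PySem.Int.toStr a ++ ",b:" ++ PySem.Int.toStr b ++ " \n " ++
    decryptAffin t a b ++ "\n "

-- ===== PORT A =====
def pvLetters (t : List Char) : List (Int × Int) :=
  (PySem.List.pyRange 0 26 1).map (fun i => (i, pvCount t i))

-- the triple results loop: for option in frecuentLetters / for lt in inverse / for i in range(26)
def pvLoopA (t : List Char) (S : List (Int × Int)) : List String :=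
  pvFrecuentLetters.foldl (fun acc option =>
    (PySem.Dict.keys pvInverse).foldl (fun acc2 lt =>
      (PySem.List.pyRange 0 26 1).foldl (fun acc3 i =>
        if PySem.Int.mod (option.1 * lt + i) 26 = (PySem.List.pyGetD S 0 (0,0)).1 ∧
           PySem.Int.mod (option.2 * lt + i) 26 = (PySem.List.pyGetD S 1 (0,0)).1 then
          acc3 ++ [pvEntry t lt i]
        else acc3) acc2) acc) []

def smartAnalysisAffine (text : String) : String :=
  let t := PySem.Chars.lower (text.toList.filter PySem.Chars.isalnum)
  PySem.Str.join "\n" (pvLoopA t (PySem.List.sorted (pvLetters t) (fun x => x.2) true))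

-- ===== PORT B =====
def pvCntList (t : List Char) : List Int :=
  (PySem.List.pyRange 0 26 1).map (pvCount t)

-- for x1,x2 in frecuentLetters / for a in inverse: b = (y1-x1*a)%26; check second congruence
def pvLoopB (t : List Char) (y1 y2 : Int) : List String :=
  pvFrecuentLetters.foldl (fun acc option =>
    (PySem.Dict.keys pvInverse).foldl (fun acc2 a =>
      let b := PySem.Int.mod (y1 - option.1 * a) 26
      if PySem.Int.mod (option.2 * a + b) 26 = y2 then
        acc2 ++ [pvEntry t a b]
      else acc2) acc) []

def smartAnalysisAffine_alt (text : String) : String :=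
  let t := PySem.Chars.lower (text.toList.filter PySem.Chars.isalnum)
  let cnt := pvCntList t
  let y1 := PySem.List.maxD (PySem.List.pyRange 0 26 1) (fun i => PySem.List.pyGetD cnt i 0) 0
  let y2 := PySem.List.maxD ((PySem.List.pyRange 0 26 1).filter (fun i => decide (i ≠ y1)))
              (fun i => PySem.List.pyGetD cnt i 0) 0
  PySem.Str.join "\n" (pvLoopB t y1 y2)

-- ===== PRECONDITION & SPEC =====
def Spec_smartAnalysisAffine (text : String) (out : String) : Prop := out = smartAnalysisAffine_alt text
instance (text : String) (out : String) : Decidable (Spec_smartAnalysisAffine text out) := by unfold Spec_smartAnalysisAffine; infer_instance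

-- ===== CLAIM (what is proved, stated in full; the proofs are below) =====
def Claim_equal_smartAnalysisAffine : Prop := ∀ (text : String), Dom_smartAnalysisAffine text → Spec_smartAnalysisAffine text (smartAnalysisAffine text)

-- ===== LEMMAS AND PROOFS =====

-- stable-descending order on (index, count) pairs: larger count first, ties by smaller index
def pvLex (p q : Int × Int) : Prop := q.2 < p.2 ∨ (p.2 = q.2 ∧ p.1 < q.1)

theorem pvLex_asymm {p q : Int × Int} (h1 : pvLex p q) (h2 : pvLex q p) : False := by
  unfold pvLex at h1 h2; omega

-- one step of the max? running maximum with a seeded accumulator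
theorem pvMaxConsCons (k : Int → Int) (a y : Int) (l : List Int) :
    PySem.List.max? (a :: y :: l) k
      = PySem.List.max? ((if k a < k y then y else a) :: l) k := by
  by_cases h : k a < k y <;> simp [PySem.List.max?, h]

-- max? on a strictly increasing nonempty list: the first element attaining the max of k
theorem pvMaxFirstAux (k : Int → Int) :
    ∀ (l : List Int) (a m : Int), (a :: l).Pairwise (· < ·) →
      PySem.List.max? (a :: l) k = some m →
      m ∈ a :: l ∧ ∀ y ∈ a :: l, k y ≤ k m ∧ (k y = k m → m ≤ y) := by
  intro l
  induction l with
  | nil =>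
    intro a m _ hm
    simp [PySem.List.max?] at hm
    subst hm
    simp
  | cons y l ih =>
    intro a m hpw hm
    rw [pvMaxConsCons] at hm
    have hay : a < y := List.rel_of_pairwise_cons hpw List.mem_cons_self
    have hpw' : ((if k a < k y then y else a) :: l).Pairwise (· < ·) := by
      constructor
      · intro z hz
        by_cases h : k a < k y <;> simp only [h, if_true, if_false]
        · exact List.rel_of_pairwise_cons hpw.of_cons hz
        · exact lt_trans hay (List.rel_of_pairwise_cons hpw.of_cons hz)
      · exact hpw.of_cons.of_cons
    obtain ⟨hmem, hbound⟩ := ih _ m hpw' hm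
    by_cases h : k a < k y
    · rw [if_pos h] at hmem hbound
      constructor
      · rcases List.mem_cons.mp hmem with rfl | h'
        · exact List.mem_cons_of_mem _ List.mem_cons_self
        · exact List.mem_cons_of_mem _ (List.mem_cons_of_mem _ h')
      · intro z hz
        rcases List.mem_cons.mp hz with rfl | hz'
        · have hym := hbound y List.mem_cons_self
          exact ⟨le_of_lt (lt_of_lt_of_le h hym.1), fun he => by omega⟩
        · exact hbound z hz'
    · rw [if_neg h] at hmem hbound
      constructor
      · rcases List.mem_cons.mp hmem with rfl | h'
        · exact List.mem_cons_self
        · exact List.mem_cons_of_mem _ (List.mem_cons_of_mem _ h')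
      · intro z hz
        have ham := hbound a List.mem_cons_self
        rcases List.mem_cons.mp hz with rfl | hz'
        · exact ham
        · rcases List.mem_cons.mp hz' with rfl | hz''
          · refine ⟨le_trans (le_of_not_gt h) ham.1, fun he => ?_⟩
            have : k a = k m := by omega
            have := ham.2 this
            omega
          · exact hbound z (List.mem_cons_of_mem _ hz'')

theorem pvMaxFirst (k : Int → Int) (l : List Int) (m : Int)
    (hpw : l.Pairwise (· < ·)) (hm : PySem.List.max? l k = some m) :
    m ∈ l ∧ ∀ y ∈ l, k y ≤ k m ∧ (k y = k m → m ≤ y) := by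
  cases l with
  | nil => simp [PySem.List.max?] at hm
  | cons a l => exact pvMaxFirstAux k l a m hpw hm

-- max? only looks at the key on elements of the list
theorem pvMaxCongrAux (k1 k2 : Int → Int) :
    ∀ (l : List Int) (a : Int), (∀ x ∈ a :: l, k1 x = k2 x) →
      PySem.List.max? (a :: l) k1 = PySem.List.max? (a :: l) k2 := by
  intro l
  induction l with
  | nil => intro a _; simp [PySem.List.max?]
  | cons y l ih =>
    intro a h
    rw [pvMaxConsCons k1, pvMaxConsCons k2]
    have ha : k1 a = k2 a := h a List.mem_cons_self
    have hy : k1 y = k2 y := h y (List.mem_cons_of_mem _ List.mem_cons_self)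
    have hc : (if k1 a < k1 y then y else a) = (if k2 a < k2 y then y else a) := by
      rw [ha, hy]
    rw [hc]
    apply ih
    intro x hx
    rcases List.mem_cons.mp hx with rfl | hx'
    · by_cases hcc : k2 a < k2 y <;> simp only [hcc, if_true, if_false] <;> [exact hy; exact ha]
    · exact h x (List.mem_cons_of_mem _ (List.mem_cons_of_mem _ hx'))

theorem pvMaxCongr (l : List Int) (k1 k2 : Int → Int) (h : ∀ x ∈ l, k1 x = k2 x) :
    PySem.List.max? l k1 = PySem.List.max? l k2 := by
  cases l with
  | nil => rfl
  | cons a l => exact pvMaxCongrAux k1 k2 l a h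

-- insertion (descending by snd, Python-stable) preserves pvLex-sortedness when the new
-- element's index is larger than every index already placed
theorem pvInsertLex (x : Int × Int) :
    ∀ (ys : List (Int × Int)), ys.Pairwise pvLex → (∀ e ∈ ys, e.1 < x.1) →
      (PySem.List.insertBy (fun a b => decide (b.2 < a.2)) x ys).Pairwise pvLex := by
  intro ys
  induction ys with
  | nil => intro _ _; simp [PySem.List.insertBy]
  | cons y ys ih =>
    intro hpw hfst
    unfold PySem.List.insertBy
    by_cases h : y.2 < x.2
    · simp only [decide_eq_true_eq, if_pos h]
      constructor
      · intro z hz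
        rcases List.mem_cons.mp hz with rfl | hz'
        · exact Or.inl h
        · have hyz := List.rel_of_pairwise_cons hpw hz'
          unfold pvLex at hyz ⊢; omega
      · exact hpw
    · simp only [decide_eq_true_eq, if_neg h]
      constructor
      · intro z hz
        rcases (PySem.List.mem_insertBy _ _ _ _).mp hz with rfl | hz'
        · have := hfst y List.mem_cons_self
          unfold pvLex; omega
        · exact List.rel_of_pairwise_cons hpw hz'
      · exact ih hpw.of_cons (fun e he => hfst e (List.mem_cons_of_mem _ he))

-- the full insertion sort: sorted(letters, key=snd, reverse=True) is pvLex-sorted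
theorem pvSortedLexAux :
    ∀ (L acc : List (Int × Int)), L.Pairwise (fun p q => p.1 < q.1) → acc.Pairwise pvLex →
      (∀ e ∈ acc, ∀ x ∈ L, e.1 < x.1) →
      (L.foldl (fun acc x => PySem.List.insertBy (fun a b => decide (b.2 < a.2)) x acc) acc).Pairwise pvLex ∧
      (∀ e ∈ L.foldl (fun acc x => PySem.List.insertBy (fun a b => decide (b.2 < a.2)) x acc) acc,
        e ∈ acc ∨ e ∈ L) := by
  intro L
  induction L with
  | nil => intro acc _ hacc _; exact ⟨hacc, fun e he => Or.inl he⟩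
  | cons x L ih =>
    intro acc hpw hacc hrel
    simp only [List.foldl_cons]
    have hins : (PySem.List.insertBy (fun a b => decide (b.2 < a.2)) x acc).Pairwise pvLex :=
      pvInsertLex x acc hacc (fun e he => hrel e he x List.mem_cons_self)
    have hmem : ∀ e ∈ PySem.List.insertBy (fun a b => decide (b.2 < a.2)) x acc,
        e ∈ acc ∨ e = x := by
      intro e he
      rcases (PySem.List.mem_insertBy _ _ _ _).mp he with rfl | h'
      · exact Or.inr rfl
      · exact Or.inl h'
    have hrel' : ∀ e ∈ PySem.List.insertBy (fun a b => decide (b.2 < a.2)) x acc,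
        ∀ z ∈ L, e.1 < z.1 := by
      intro e he z hz
      rcases hmem e he with h' | rfl
      · exact hrel e h' z (List.mem_cons_of_mem _ hz)
      · exact List.rel_of_pairwise_cons hpw hz
    have := ih _ hpw.of_cons hins hrel'
    refine ⟨this.1, fun e he => ?_⟩
    rcases this.2 e he with h' | h'
    · rcases hmem e h' with h'' | rfl
      · exact Or.inl h''
      · exact Or.inr List.mem_cons_self
    · exact Or.inr (List.mem_cons_of_mem _ h')

theorem pvSortedLex (L : List (Int × Int)) (h : L.Pairwise (fun p q => p.1 < q.1)) :
    (PySem.List.sorted L (fun x => x.2) true).Pairwise pvLex := by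
  rw [PySem.List.sorted_rev_eq_foldl_insertBy]
  exact (pvSortedLexAux L [] h (by simp) (by simp)).1

-- a pvLex-sorted permutation of L starts with the unique pvLex-minimum of L
theorem pvHeadOfSorted (S L : List (Int × Int)) (m : Int × Int)
    (hperm : S.Perm L) (hpw : S.Pairwise pvLex) (hm : m ∈ L)
    (hmin : ∀ e ∈ L, e ≠ m → pvLex m e) : ∃ t, S = m :: t := by
  cases S with
  | nil =>
    exact absurd (hperm.mem_iff.mpr hm) (List.not_mem_nil)
  | cons s t =>
    by_cases hsm : s = m
    · exact ⟨t, by rw [hsm]⟩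
    · exfalso
      have hmS : m ∈ s :: t := hperm.mem_iff.mpr hm
      have hmt : m ∈ t := by
        rcases List.mem_cons.mp hmS with rfl | h'
        · exact absurd rfl hsm
        · exact h'
      have h1 : pvLex s m := List.rel_of_pairwise_cons hpw hmt
      have hsL : s ∈ L := hperm.mem_iff.mp List.mem_cons_self
      have h2 : pvLex m s := hmin s hsL hsm
      exact pvLex_asymm h1 h2

-- emission: the inner range(26) scan of A contributes the single solved b of B
theorem pvModIff (c y i : Int) (hy : 0 ≤ y ∧ y < 26) (hi : 0 ≤ i ∧ i < 26) :
    (PySem.Int.mod (c + i) 26 = y ↔ i = PySem.Int.mod (y - c) 26) := by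
  rw [PySem.Int.mod_eq_emod_of_pos (by norm_num : (0:Int) < 26), PySem.Int.mod_eq_emod_of_pos (by norm_num : (0:Int) < 26)]
  omega

theorem pvFilterSingle {q : Int → Bool} :
    ∀ (l : List Int), l.Nodup → ∀ b ∈ l,
      l.filter (fun i => decide (i = b) && q i) = if q b then [b] else [] := by
  intro l
  induction l with
  | nil => intro _ b hb; exact absurd hb List.not_mem_nil
  | cons x l ih =>
    intro hnd b hb
    rcases List.mem_cons.mp hb with rfl | hb'
    · have hnotin : ∀ i ∈ l, ¬(i = b) := by
        intro i hi heq; rw [heq] at hi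
        exact (List.nodup_cons.mp hnd).1 hi
      by_cases hq : q b
      · simp only [List.filter_cons]
        rw [if_pos (by simp [hq])]
        have : l.filter (fun i => decide (i = b) && q i) = [] := by
          apply List.filter_eq_nil_iff.mpr
          intro i hi
          simp only [Bool.and_eq_true, decide_eq_true_eq]
          intro ⟨h1, _⟩; exact hnotin i hi h1
        rw [this, if_pos hq]
      · simp only [List.filter_cons]
        rw [if_neg (by simp [hq])]
        have : l.filter (fun i => decide (i = b) && q i) = [] := by
          apply List.filter_eq_nil_iff.mpr
          intro i hi
          simp only [Bool.and_eq_true, decide_eq_true_eq]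
          intro ⟨h1, _⟩; exact hnotin i hi h1
        rw [this, if_neg hq]
    · have hxb : x ≠ b := by
        intro heq; rw [heq] at hnd
        exact (List.nodup_cons.mp hnd).1 hb'
      simp only [List.filter_cons]
      rw [if_neg (by simp [hxb])]
      exact ih (List.nodup_cons.mp hnd).2 b hb'

-- the top-two extraction agrees: sorted[0][0], sorted[1][0] = the two argmaxes of B
theorem pvTopTwo (cnt : Int → Int) (y1 y2 : Int)
    (hy1 : PySem.List.maxD (PySem.List.pyRange 0 26 1) cnt 0 = y1)
    (hy2 : PySem.List.maxD ((PySem.List.pyRange 0 26 1).filter (fun i => decide (i ≠ y1))) cnt 0 = y2) :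
    (PySem.List.pyGetD (PySem.List.sorted ((PySem.List.pyRange 0 26 1).map (fun i => (i, cnt i))) (fun x => x.2) true) 0 ((0:Int),(0:Int))).1 = y1 ∧
    (PySem.List.pyGetD (PySem.List.sorted ((PySem.List.pyRange 0 26 1).map (fun i => (i, cnt i))) (fun x => x.2) true) 1 ((0:Int),(0:Int))).1 = y2 ∧
    (0 ≤ y1 ∧ y1 < 26) := by
  have hRpw : (PySem.List.pyRange 0 26 1).Pairwise (· < ·) := by decide
  -- y1 is the first count-maximum of 0..25
  obtain ⟨m1, hm1some⟩ : ∃ m, PySem.List.max? (PySem.List.pyRange 0 26 1) cnt = some m := by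
    cases h : PySem.List.max? (PySem.List.pyRange 0 26 1) cnt with
    | none =>
      have := (PySem.List.max?_eq_none_iff _ _).mp h
      exact absurd this (by decide)
    | some m => exact ⟨m, rfl⟩
  have hy1m : y1 = m1 := by
    rw [← hy1]; unfold PySem.List.maxD; rw [hm1some]; rfl
  obtain ⟨hm1mem, hm1bnd⟩ := pvMaxFirst cnt _ m1 hRpw hm1some
  subst hy1m
  have hy1R : y1 ∈ PySem.List.pyRange 0 26 1 := hm1mem
  have hy1b : 0 ≤ y1 ∧ y1 < 26 := PySem.List.mem_pyRange_one.mp hy1R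
  -- y2 is the first count-maximum of 0..25 without y1
  have hlfpw : ((PySem.List.pyRange 0 26 1).filter (fun i => decide (i ≠ y1))).Pairwise (· < ·) :=
    hRpw.filter _
  obtain ⟨m2, hm2some⟩ : ∃ m, PySem.List.max? ((PySem.List.pyRange 0 26 1).filter (fun i => decide (i ≠ y1))) cnt = some m := by
    cases h : PySem.List.max? ((PySem.List.pyRange 0 26 1).filter (fun i => decide (i ≠ y1))) cnt with
    | none =>
      exfalso
      have hnil := (PySem.List.max?_eq_none_iff _ _).mp h
      have : ∃ x, x ∈ (PySem.List.pyRange 0 26 1).filter (fun i => decide (i ≠ y1)) := by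
        by_cases h0 : y1 = 0
        · exact ⟨1, List.mem_filter.mpr ⟨by decide, by simp [h0]⟩⟩
        · exact ⟨0, List.mem_filter.mpr ⟨by decide, by simp; omega⟩⟩
      obtain ⟨x, hx⟩ := this
      rw [hnil] at hx
      exact List.not_mem_nil hx
    | some m => exact ⟨m, rfl⟩
  have hy2m : y2 = m2 := by
    rw [← hy2]; unfold PySem.List.maxD; rw [hm2some]; rfl
  obtain ⟨hm2mem, hm2bnd⟩ := pvMaxFirst cnt _ m2 hlfpw hm2some
  subst hy2m
  have hy2f := List.mem_filter.mp hm2mem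
  have hy2R : y2 ∈ PySem.List.pyRange 0 26 1 := hy2f.1
  have hy2ne : y2 ≠ y1 := by simpa using hy2f.2
  -- the letters list and its stable descending sort
  have hLpw : ((PySem.List.pyRange 0 26 1).map (fun i => (i, cnt i))).Pairwise
      (fun p q => p.1 < q.1) := by
    rw [List.pairwise_map]
    exact hRpw
  have hLnd : ((PySem.List.pyRange 0 26 1).map (fun i => (i, cnt i))).Nodup :=
    (hLpw.imp (fun {a b} h => by intro he; rw [he] at h; exact lt_irrefl _ h))
  have hSpw := pvSortedLex _ hLpw
  have hperm : (PySem.List.sorted ((PySem.List.pyRange 0 26 1).map (fun i => (i, cnt i))) (fun x => x.2) true).Perm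
      ((PySem.List.pyRange 0 26 1).map (fun i => (i, cnt i))) := PySem.List.sorted_perm _ _ _
  -- head = (y1, cnt y1)
  have hm'L : ((y1, cnt y1) : Int × Int) ∈ (PySem.List.pyRange 0 26 1).map (fun i => (i, cnt i)) :=
    List.mem_map.mpr ⟨y1, hy1R, rfl⟩
  have hmin1 : ∀ e ∈ (PySem.List.pyRange 0 26 1).map (fun i => (i, cnt i)),
      e ≠ (y1, cnt y1) → pvLex (y1, cnt y1) e := by
    intro e he hne
    obtain ⟨j, hjR, rfl⟩ := List.mem_map.mp he
    have hb := hm1bnd j hjR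
    by_cases hc : cnt j = cnt y1
    · have hjne : j ≠ y1 := by
        intro h; exact hne (by rw [h])
      have := hb.2 hc
      exact Or.inr ⟨hc.symm, by omega⟩
    · exact Or.inl (lt_of_le_of_ne hb.1 hc)
  obtain ⟨t, hS⟩ := pvHeadOfSorted _ _ _ hperm hSpw hm'L hmin1
  -- second = (y2, cnt y2)
  have htperm : t.Perm (((PySem.List.pyRange 0 26 1).map (fun i => (i, cnt i))).erase (y1, cnt y1)) := by
    have := hperm
    rw [hS] at this
    exact (List.cons_perm_iff_perm_erase.mp this).2
  have htpw : t.Pairwise pvLex := by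
    have := hSpw; rw [hS] at this; exact this.of_cons
  have hm2'mem : ((y2, cnt y2) : Int × Int) ∈ (((PySem.List.pyRange 0 26 1).map (fun i => (i, cnt i))).erase (y1, cnt y1)) := by
    rw [List.Nodup.mem_erase_iff hLnd]
    exact ⟨by simp [hy2ne], List.mem_map.mpr ⟨y2, hy2R, rfl⟩⟩
  have hmin2 : ∀ e ∈ (((PySem.List.pyRange 0 26 1).map (fun i => (i, cnt i))).erase (y1, cnt y1)),
      e ≠ (y2, cnt y2) → pvLex (y2, cnt y2) e := by
    intro e he hne
    have he' := (List.Nodup.mem_erase_iff hLnd).mp he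
    obtain ⟨j, hjR, rfl⟩ := List.mem_map.mp he'.2
    have hjne1 : j ≠ y1 := by
      intro h; exact he'.1 (by rw [h])
    have hjlf : j ∈ (PySem.List.pyRange 0 26 1).filter (fun i => decide (i ≠ y1)) :=
      List.mem_filter.mpr ⟨hjR, by simp [hjne1]⟩
    have hb := hm2bnd j hjlf
    by_cases hc : cnt j = cnt y2
    · have hjne2 : j ≠ y2 := by
        intro h; exact hne (by rw [h])
      have := hb.2 hc
      exact Or.inr ⟨hc.symm, by omega⟩
    · exact Or.inl (lt_of_le_of_ne hb.1 hc)
  obtain ⟨t', hT⟩ := pvHeadOfSorted _ _ _ htperm htpw hm2'mem hmin2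
  rw [hS, hT]
  refine ⟨?_, ?_, hy1b⟩
  · rw [PySem.List.pyGetD_zero_cons]
  · rw [PySem.List.pyGetD_ofNat']
    rfl

-- the loops agree given equal y1, y2 in range
theorem pvLoops (t : List Char) (S : List (Int × Int)) (y1 y2 : Int)
    (h0 : (PySem.List.pyGetD S 0 ((0:Int),(0:Int))).1 = y1)
    (h1 : (PySem.List.pyGetD S 1 ((0:Int),(0:Int))).1 = y2)
    (hy1 : 0 ≤ y1 ∧ y1 < 26) : pvLoopA t S = pvLoopB t y1 y2 := by
  unfold pvLoopA pvLoopB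
  rw [h0, h1]
  apply PySem.List.foldl_congr_mem
  intro acc option _
  apply PySem.List.foldl_congr_mem
  intro acc2 lt _
  rw [PySem.List.foldl_append_ite
    (p := fun i => PySem.Int.mod (option.1 * lt + i) 26 = y1 ∧ PySem.Int.mod (option.2 * lt + i) 26 = y2)
    (f := fun i => pvEntry t lt i)]
  have hb : 0 ≤ PySem.Int.mod (y1 - option.1 * lt) 26 ∧ PySem.Int.mod (y1 - option.1 * lt) 26 < 26 :=
    ⟨PySem.Int.mod_nonneg _ (by norm_num), PySem.Int.mod_lt _ (by norm_num)⟩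
  have hfc : (PySem.List.pyRange 0 26 1).filter
      (fun i => decide (PySem.Int.mod (option.1 * lt + i) 26 = y1 ∧ PySem.Int.mod (option.2 * lt + i) 26 = y2))
      = (PySem.List.pyRange 0 26 1).filter
      (fun i => decide (i = PySem.Int.mod (y1 - option.1 * lt) 26) && decide (PySem.Int.mod (option.2 * lt + i) 26 = y2)) := by
    apply List.filter_congr
    intro i hi
    have hib := PySem.List.mem_pyRange_one.mp hi
    rw [Bool.decide_and]
    have : (PySem.Int.mod (option.1 * lt + i) 26 = y1) ↔ (i = PySem.Int.mod (y1 - option.1 * lt) 26) :=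
      pvModIff (option.1 * lt) y1 i hy1 hib
    rw [decide_eq_decide.mpr this]
  rw [hfc, pvFilterSingle (PySem.List.pyRange 0 26 1) (by decide) _
    (PySem.List.mem_pyRange_one.mpr hb)]
  show acc2 ++ _ = if PySem.Int.mod (option.2 * lt + PySem.Int.mod (y1 - option.1 * lt) 26) 26 = y2
      then acc2 ++ [pvEntry t lt (PySem.Int.mod (y1 - option.1 * lt) 26)] else acc2
  by_cases hq : PySem.Int.mod (option.2 * lt + PySem.Int.mod (y1 - option.1 * lt) 26) 26 = y2
  · rw [if_pos (decide_eq_true hq), if_pos hq, List.map_cons, List.map_nil]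
  · rw [if_neg (by simpa using hq), if_neg hq, List.map_nil, List.append_nil]

-- ===== VERDICT (by name: the statement is the Claim_ definition above) =====
theorem smartAnalysisAffine_spec : Claim_equal_smartAnalysisAffine := by
  intro text _
  show smartAnalysisAffine text = smartAnalysisAffine_alt text
  unfold smartAnalysisAffine smartAnalysisAffine_alt
  dsimp only
  set t := PySem.Chars.lower (List.filter PySem.Chars.isalnum text.toList) with ht
  have hk : ∀ i ∈ PySem.List.pyRange 0 26 1,
      (fun i => PySem.List.pyGetD (pvCntList t) i 0) i = pvCount t i := by
    intro i hi
    have hib := PySem.List.mem_pyRange_one.mp hi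
    show PySem.List.pyGetD (pvCntList t) i 0 = pvCount t i
    unfold pvCntList
    exact PySem.List.pyGetD_map_pyRange_of_nonneg _ _ _ _ hib.1 hib.2
  have hmax1 : PySem.List.maxD (PySem.List.pyRange 0 26 1) (fun i => PySem.List.pyGetD (pvCntList t) i 0) 0
      = PySem.List.maxD (PySem.List.pyRange 0 26 1) (pvCount t) 0 := by
    unfold PySem.List.maxD
    rw [pvMaxCongr _ _ _ hk]
  rw [hmax1]
  have hmax2 : PySem.List.maxD ((PySem.List.pyRange 0 26 1).filter
        (fun i => decide (i ≠ PySem.List.maxD (PySem.List.pyRange 0 26 1) (pvCount t) 0)))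
        (fun i => PySem.List.pyGetD (pvCntList t) i 0) 0
      = PySem.List.maxD ((PySem.List.pyRange 0 26 1).filter
        (fun i => decide (i ≠ PySem.List.maxD (PySem.List.pyRange 0 26 1) (pvCount t) 0)))
        (pvCount t) 0 := by
    unfold PySem.List.maxD
    rw [pvMaxCongr _ _ _ (fun i hi => hk i (List.mem_filter.mp hi).1)]
  rw [hmax2]
  obtain ⟨h0, h1, hy1b⟩ := pvTopTwo (pvCount t)
    (PySem.List.maxD (PySem.List.pyRange 0 26 1) (pvCount t) 0)
    (PySem.List.maxD ((PySem.List.pyRange 0 26 1).filter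
      (fun i => decide (i ≠ PySem.List.maxD (PySem.List.pyRange 0 26 1) (pvCount t) 0)))
      (pvCount t) 0) rfl rfl
  have hL : pvLetters t = (PySem.List.pyRange 0 26 1).map (fun i => (i, pvCount t i)) := rfl
  rw [hL]
  exact congrArg (PySem.Str.join "\n") (pvLoops t _ _ _ h0 h1 hy1b)
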